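-- pv_equiv track=rewrite | github.com/seoyeon-00/PG_CodingTest | Python/Level0/등차수열에 특정한 항만 더하기.py | solution
-- ===== SOURCE A (Python) =====
-- def solution(a, d, included):
--     answer = 0
--     # 빈배열
--     arr = []
--
--     # for문 - 등차수열로 만들어진 배열을 담아준다
--     for i in included:
--         if(len(arr) == 0):
--             arr.append(a)
--         else:
--             arr.append(arr[-1] + d)
--
--     # included가 false일 경우 배열에서 제거
--     # reversed - 순서대로 하면 index가 꼬이기 때문에 뒤에서 부터 제거
--     for index, isTrue in reversed(list(enumerate(included))):
--         if not isTrue: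
--
--             # 해당 index의 배열 요소를 제거
--             arr.pop(index)
--
--     answer = sum(arr)
--     return answer
-- ===== SOURCE B (Python) =====
-- def solution(a, d, included):
--     # single pass: the i-th term of the sequence is a + i*d
--     return sum(a + i * d for i, inc in enumerate(included) if inc)
-- ===== Notes on version B (the rewrite author's own statement) =====
-- stated objective: faster
-- what changed: Replaces building the whole sequence list and popping excluded entries by index from the back (list.pop is O(n) each) with a single pass summing a+i*d for the included indices.
import Mathlib
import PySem

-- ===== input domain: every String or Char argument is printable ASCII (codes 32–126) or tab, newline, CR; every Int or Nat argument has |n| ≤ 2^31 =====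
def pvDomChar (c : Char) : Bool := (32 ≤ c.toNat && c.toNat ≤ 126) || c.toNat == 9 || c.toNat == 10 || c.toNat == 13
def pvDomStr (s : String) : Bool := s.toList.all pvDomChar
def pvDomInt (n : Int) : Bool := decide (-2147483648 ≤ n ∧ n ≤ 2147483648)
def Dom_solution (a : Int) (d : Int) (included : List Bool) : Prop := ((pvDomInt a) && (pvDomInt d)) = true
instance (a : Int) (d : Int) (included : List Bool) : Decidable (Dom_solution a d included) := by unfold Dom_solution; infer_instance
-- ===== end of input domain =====

-- B replaces A's build-then-pop-from-the-back quadratic list manipulation by a single pass summing a+i*d over included indices (faster).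

-- ===== PORT A =====
-- step of A's first loop: append a if arr is empty, else arr[-1] + d
def buildStep (a : Int) (d : Int) (arr : List Int) (_ : Bool) : List Int :=
  if arr.length == 0 then arr ++ [a]
  else arr ++ [((PySem.List.pyGet? arr (-1)).getD 0) + d]

-- step of A's second loop: arr.pop(index) when not isTrue (pop never fails in A; getD is a totality guard)
def popStep (arr : List Int) (p : Int × Bool) : List Int :=
  if !p.2 then ((PySem.List.pop? arr p.1).map (·.2)).getD arr else arr

def solution (a : Int) (d : Int) (included : List Bool) : Int :=
  let arr := included.foldl (buildStep a d) []
  let arr2 := ((PySem.List.enumerate included 0).reverse).foldl popStep arr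
  arr2.sum

-- ===== PORT B =====
def solution_alt (a : Int) (d : Int) (included : List Bool) : Int :=
  (PySem.List.enumerate included 0).foldl
    (fun s p => if p.2 then s + (a + p.1 * d) else s) 0

-- ===== PRECONDITION & SPEC =====
def Spec_solution (a : Int) (d : Int) (included : List Bool) (out : Int) : Prop := out = solution_alt a d included
instance (a : Int) (d : Int) (included : List Bool) (out : Int) : Decidable (Spec_solution a d included out) := by unfold Spec_solution; infer_instance

-- ===== CLAIM (what is proved, stated in full; the proofs are below) =====
def Claim_equal_solution : Prop := ∀ (a : Int) (d : Int) (included : List Bool), Dom_solution a d included → Spec_solution a d included (solution a d included)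

-- ===== LEMMAS AND PROOFS =====

-- the arithmetic sequence of length n starting at a
def arith (a : Int) (d : Int) : Nat → List Int
  | 0 => []
  | n + 1 => a :: arith (a + d) d n

theorem build_snoc (a d : Int) (bs : List Bool) : ∀ (arr : List Int) (x : Int),
    List.foldl (buildStep a d) (arr ++ [x]) bs = (arr ++ [x]) ++ arith (x + d) d bs.length := by
  induction bs with
  | nil => intro arr x; simp [arith]
  | cons b bs ih =>
    intro arr x
    have h1 : buildStep a d (arr ++ [x]) b = (arr ++ [x]) ++ [x + d] := by
      simp [buildStep, PySem.List.pyGet?_neg_one_append_singleton]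
    have h2 := ih (arr ++ [x]) (x + d)
    simp only [List.foldl_cons, h1]
    rw [h2]
    simp [arith]

theorem build_eq (a d : Int) (bs : List Bool) :
    List.foldl (buildStep a d) [] bs = arith a d bs.length := by
  cases bs with
  | nil => simp [arith]
  | cons b bs =>
    have h1 : buildStep a d [] b = [] ++ [a] := by simp [buildStep]
    simp only [List.foldl_cons, h1]
    rw [build_snoc a d bs [] a]
    simp [arith]

theorem enumerate_shift {α : Type} (bs : List α) : ∀ s : Int,
    PySem.List.enumerate bs (s + 1) = (PySem.List.enumerate bs s).map (fun p => (p.1 + 1, p.2)) := by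
  induction bs with
  | nil => intro s; simp [PySem.List.enumerate_nil]
  | cons b bs ih =>
    intro s
    simp [PySem.List.enumerate_cons, ih (s + 1)]

theorem pop_cons (x : Int) (arr : List Int) (i : Int) (h : 1 ≤ i) :
    ((PySem.List.pop? (x :: arr) i).map (·.2)).getD (x :: arr)
      = x :: (((PySem.List.pop? arr (i - 1)).map (·.2)).getD arr) := by
  obtain ⟨k, rfl⟩ : ∃ k : Nat, i = (k : Int) + 1 := ⟨(i - 1).toNat, by omega⟩
  have hi : (k : Int) + 1 - 1 = (k : Int) := by ring
  rw [hi]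
  by_cases hk : k < arr.length
  · have hk1 : k + 1 < (x :: arr).length := by simpa using Nat.succ_lt_succ hk
    have h1 : PySem.List.pop? (x :: arr) ((k : Int) + 1) = some ((x :: arr)[k + 1], (x :: arr).eraseIdx (k + 1)) := by
      have := PySem.List.pop?_natCast (xs := x :: arr) (n := k + 1) hk1
      simpa using this
    have h2 : PySem.List.pop? arr ((k : Int)) = some (arr[k], arr.eraseIdx k) :=
      PySem.List.pop?_natCast (xs := arr) (n := k) hk
    simp [h1, h2, List.eraseIdx_cons_succ]
  · have h1 : PySem.List.pop? (x :: arr) ((k : Int) + 1) = none := by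
      simp [PySem.List.pop?, PySem.List.pyIdx?, hk]; omega
    have h2 : PySem.List.pop? arr ((k : Int)) = none := by
      simp [PySem.List.pop?, PySem.List.pyIdx?, hk]
    simp [h1, h2]

theorem popStep_cons (x : Int) (arr : List Int) (p : Int × Bool) (h : 1 ≤ p.1) :
    popStep (x :: arr) p = x :: popStep arr (p.1 - 1, p.2) := by
  obtain ⟨i, b⟩ := p
  cases b
  · simpa [popStep] using pop_cons x arr i h
  · simp [popStep]

theorem popFold_cons (x : Int) (l : List (Int × Bool)) : ∀ (arr : List Int),
    (∀ p ∈ l, (1 : Int) ≤ p.1) →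
    List.foldl popStep (x :: arr) l = x :: List.foldl popStep arr (l.map (fun p => (p.1 - 1, p.2))) := by
  induction l with
  | nil => intro arr _; simp
  | cons p l ih =>
    intro arr h
    have hp : (1 : Int) ≤ p.1 := h p (by simp)
    simp only [List.foldl_cons, List.map_cons]
    rw [popStep_cons x arr p hp]
    exact ih _ (fun q hq => h q (by simp [hq]))

theorem foldl_if_add (g : Int × Bool → Int) (l : List (Int × Bool)) : ∀ c : Int,
    List.foldl (fun s p => if p.2 then s + g p else s) c l
      = c + List.foldl (fun s p => if p.2 then s + g p else s) 0 l := by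
  induction l with
  | nil => intro c; simp
  | cons p l ih =>
    intro c
    simp only [List.foldl_cons]
    rw [ih (if p.2 then c + g p else c), ih (if p.2 then 0 + g p else 0)]
    split_ifs <;> ring

theorem alt_rec (a d : Int) (b : Bool) (bs : List Bool) :
    solution_alt a d (b :: bs) = (if b then a else 0) + solution_alt (a + d) d bs := by
  simp only [solution_alt, PySem.List.enumerate_cons, List.foldl_cons]
  rw [show ((0 : Int) + 1) = (0 : Int) + 1 from rfl, enumerate_shift bs 0, List.foldl_map]
  have hfun : (fun (s : Int) (p : Int × Bool) =>
        if ((fun q : Int × Bool => (q.1 + 1, q.2)) p).2 then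
          s + (a + ((fun q : Int × Bool => (q.1 + 1, q.2)) p).1 * d) else s)
      = (fun (s : Int) (p : Int × Bool) => if p.2 then s + ((a + d) + p.1 * d) else s) := by
    funext s p
    by_cases hp : p.2 <;> simp [hp] <;> ring
  rw [hfun, foldl_if_add (fun p => (a + d) + p.1 * d)]
  cases b <;> simp

theorem main_eq (d : Int) (bs : List Bool) : ∀ a : Int, solution a d bs = solution_alt a d bs := by
  induction bs with
  | nil => intro a; simp [solution, solution_alt, PySem.List.enumerate_nil]
  | cons b bs ih =>
    intro a
    have hb : List.foldl (buildStep a d) [] (b :: bs) = a :: arith (a + d) d bs.length := by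
      rw [build_eq]; rfl
    have henum : (PySem.List.enumerate (b :: bs) 0).reverse
        = (PySem.List.enumerate bs (0 + 1)).reverse ++ [((0 : Int), b)] := by
      simp [PySem.List.enumerate_cons]
    have hge : ∀ p ∈ (PySem.List.enumerate bs (0 + 1)).reverse, (1 : Int) ≤ p.1 := by
      intro p hp
      rw [List.mem_reverse, PySem.List.mem_enumerate_iff] at hp
      obtain ⟨k, hk, rfl⟩ := hp
      simp
    have hmap : ((PySem.List.enumerate bs (0 + 1)).reverse).map (fun p => (p.1 - 1, p.2))
        = (PySem.List.enumerate bs 0).reverse := by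
      rw [enumerate_shift bs 0]
      simp [List.map_reverse, List.map_map, Function.comp_def]
    have hR : (List.foldl popStep (arith (a + d) d bs.length) ((PySem.List.enumerate bs 0).reverse)).sum
        = solution (a + d) d bs := by
      simp [solution, build_eq]
    simp only [solution, hb, henum, List.foldl_append]
    rw [popFold_cons a _ _ hge, hmap]
    rw [alt_rec]
    cases b
    · simp only [List.foldl_cons, List.foldl_nil]
      rw [show popStep (a :: List.foldl popStep (arith (a + d) d bs.length) ((PySem.List.enumerate bs 0).reverse)) ((0 : Int), false)
          = List.foldl popStep (arith (a + d) d bs.length) ((PySem.List.enumerate bs 0).reverse) by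
        simp [popStep, PySem.List.pop?_zero_cons]]
      rw [hR, ih (a + d)]
      simp
    · simp only [List.foldl_cons, List.foldl_nil]
      rw [show popStep (a :: List.foldl popStep (arith (a + d) d bs.length) ((PySem.List.enumerate bs 0).reverse)) ((0 : Int), true)
          = a :: List.foldl popStep (arith (a + d) d bs.length) ((PySem.List.enumerate bs 0).reverse) by
        simp [popStep]]
      simp only [List.sum_cons]
      rw [hR, ih (a + d)]
      simp

-- ===== VERDICT (by name: the statement is the Claim_ definition above) =====
theorem solution_spec : Claim_equal_solution := by
  intro a d included _
  unfold Spec_solution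
  exact main_eq d included a
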